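-- pv_equiv track=rewrite | github.com/richt3211/practice-coding-problems | plaid/plaid-interview/test.py | recurring_list2
-- ===== SOURCE A (Python) =====
-- def recurring_list2(_list):
--     d = {l[0]: [] for l in _list}
--     for l in _list:
--
--         # {
--         #     "Netflix": {curr_value: 9.99, curr_time: 10, count: 0, difference: number}
--         # }
--
--         # dict holds last seen value for a description, and the count
--         # add key to dict if it doesn't exist already
--         # check the current value against the previous value, if it's there
--         # if l[0] in d:
--
--         # elif:
--
--         d[l[0]].append((l[1], l[2]))
--
--     ret = []
--     for key,value in d.items():
--         # check if all amounts are same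
--         # check if all timestamps are same distance
--         # check if there are at least 3 values
--         same_value = True
--         same_difference = True
--         count = 0
--         if len(value) < 3:
--             continue
--         curr_value = value[0][0]
--         curr_time = value[0][1]
--         difference = value[1][1] - value[0][1]
--         iter_count = 0
--         for v in value:
--             if iter_count != 0:
--                 if (v[0] != curr_value):
--                     same_value = False
--                     continue
--                 if (v[1] - curr_time) != difference:
--                     same_difference = False
--                     continue
--                 count += 1
--                 curr_value = v[0]
--                 curr_time = v[1]
--             iter_count += 1
--
--         if count >= 2 and same_value and same_difference:
--             ret.append(key)
--     return ret
-- ===== SOURCE B (Python) =====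
-- def recurring_list2(_list):
--     recs = {}
--     for l in _list:
--         key, value, time = l[0], l[1], l[2]
--         r = recs.get(key)
--         if r is None:
--             recs[key] = (value, time, 0, 1, True)
--         else:
--             ref, prev, step, cnt, valid = r
--             if cnt == 1:
--                 recs[key] = (ref, time, time - prev, 2, valid and value == ref)
--             else:
--                 recs[key] = (ref, time, step, cnt + 1,
--                              valid and value == ref and time - prev == step)
--     return [k for k, (ref, prev, step, cnt, valid) in recs.items()
--             if cnt >= 3 and valid]
-- ===== Notes on version B (the rewrite author's own statement) =====
-- stated objective: alternative
-- what changed: Replaces A's two-phase build-per-key-lists-then-rescan-with-flags structure by a single online pass that keeps a constant-size record (reference value, previous timestamp, step, count, valid flag) per key and then emits keys with count>=3 still valid.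
import Mathlib
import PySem

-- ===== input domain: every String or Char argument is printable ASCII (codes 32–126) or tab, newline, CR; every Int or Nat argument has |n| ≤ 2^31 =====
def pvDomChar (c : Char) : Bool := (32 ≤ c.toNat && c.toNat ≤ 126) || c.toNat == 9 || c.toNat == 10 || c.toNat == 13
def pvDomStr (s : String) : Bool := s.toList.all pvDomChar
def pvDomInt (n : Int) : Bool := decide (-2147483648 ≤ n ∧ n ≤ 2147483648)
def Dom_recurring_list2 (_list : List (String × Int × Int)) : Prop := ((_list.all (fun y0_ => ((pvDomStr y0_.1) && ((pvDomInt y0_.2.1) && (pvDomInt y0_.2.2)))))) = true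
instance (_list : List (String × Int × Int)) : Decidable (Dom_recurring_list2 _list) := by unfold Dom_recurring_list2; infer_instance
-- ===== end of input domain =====

-- B replaces A's build-per-key-lists-then-rescan structure by one online validation pass
-- keeping a constant-size record per key (alternative decomposition; return value only).

-- ===== PORT A =====
-- A's inner flag loop, one step (state: same_value, same_difference, count, curr_value, curr_time, iter_count)
def pvStepA (difference : Int) (st : Bool × Bool × Int × Int × Int × Int) (v : Int × Int) :
    Bool × Bool × Int × Int × Int × Int :=
  match st with
  | (sv, sd, cnt, cv, ct, ic) =>
    if ic ≠ 0 then
      if v.1 ≠ cv then (false, sd, cnt, cv, ct, ic + 1)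
      else if v.2 - ct ≠ difference then (sv, false, cnt, cv, ct, ic + 1)
      else (sv, sd, cnt + 1, v.1, v.2, ic + 1)
    else (sv, sd, cnt, cv, ct, ic + 1)

-- A's per-key body: True iff the key is appended to ret
def pvCheckA (value : List (Int × Int)) : Bool :=
  if value.length < 3 then false
  else
    let curr_value := (PySem.List.pyGetD value 0 (0, 0)).1
    let curr_time := (PySem.List.pyGetD value 0 (0, 0)).2
    let difference := (PySem.List.pyGetD value 1 (0, 0)).2 - (PySem.List.pyGetD value 0 (0, 0)).2
    let r := value.foldl (pvStepA difference) (true, true, 0, curr_value, curr_time, 0)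
    decide (2 ≤ r.2.2.1) && r.1 && r.2.1

def recurring_list2 (_list : List (String × Int × Int)) : List String :=
  let d0 : PySem.Dict String (List (Int × Int)) :=
    _list.foldl (fun d l => d.insert l.1 []) PySem.Dict.empty
  let d : PySem.Dict String (List (Int × Int)) :=
    _list.foldl (fun d l => d.modify l.1 [] (fun g => g ++ [(l.2.1, l.2.2)])) d0
  d.items.foldl (fun ret kv => if pvCheckA kv.2 then ret ++ [kv.1] else ret) []

-- ===== PORT B =====
-- one online update of a key's record (ref value, prev time, step, count, valid)
def pvRecStep (o : Option (Int × Int × Int × Int × Bool)) (value time : Int) :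
    Int × Int × Int × Int × Bool :=
  match o with
  | none => (value, time, 0, 1, true)
  | some (ref, prev, step, cnt, valid) =>
    if cnt == 1 then (ref, time, time - prev, 2, valid && (value == ref))
    else (ref, time, step, cnt + 1, valid && (value == ref) && (time - prev == step))

def recurring_list2_alt (_list : List (String × Int × Int)) : List String :=
  let recs : PySem.Dict String (Int × Int × Int × Int × Bool) :=
    _list.foldl (fun d l => d.insert l.1 (pvRecStep (d.get? l.1) l.2.1 l.2.2)) PySem.Dict.empty
  (recs.items.filter (fun kv => decide (3 ≤ kv.2.2.2.2.1) && kv.2.2.2.2.2)).map (·.1)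

-- ===== PRECONDITION & SPEC =====
def Spec_recurring_list2 (_list : List (String × Int × Int)) (out : List String) : Prop := out = recurring_list2_alt _list
instance (_list : List (String × Int × Int)) (out : List String) : Decidable (Spec_recurring_list2 _list out) := by unfold Spec_recurring_list2; infer_instance

-- ===== CLAIM (what is proved, stated in full; the proofs are below) =====
def Claim_equal_recurring_list2 : Prop := ∀ (_list : List (String × Int × Int)), Dom_recurring_list2 _list → Spec_recurring_list2 _list (recurring_list2 _list)

-- ===== LEMMAS AND PROOFS =====

-- canonical per-key chain condition: every entry has the reference value and times advance by step
def pvChain (ref prev step : Int) : List (Int × Int) → Bool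
  | [] => true
  | v :: t => ((v.1 == ref) && (v.2 - prev == step)) && pvChain ref v.2 step t

def pvRecOf (g : List (Int × Int)) : Option (Int × Int × Int × Int × Bool) :=
  g.foldl (fun o v => some (pvRecStep o v.1 v.2)) none

def pvCheckB (o : Option (Int × Int × Int × Int × Bool)) : Bool :=
  match o with
  | none => false
  | some r => decide (3 ≤ r.2.2.2.1) && r.2.2.2.2

-- poison: once a flag is false it stays false
theorem pvLemA0 (δ : Int) (l : List (Int × Int)) (sv sd : Bool) (cnt cv ct ic : Int)
    (h : (sv && sd) = false) :
    ((l.foldl (pvStepA δ) (sv, sd, cnt, cv, ct, ic)).1 && (l.foldl (pvStepA δ) (sv, sd, cnt, cv, ct, ic)).2.1) = false := by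
  induction l generalizing sv sd cnt cv ct ic with
  | nil => simpa using h
  | cons v t ih =>
    simp only [List.foldl_cons, pvStepA]
    split_ifs with h1 h2 h3
    · exact ih false sd cnt cv ct (ic+1) (by simp)
    · exact ih sv false cnt cv ct (ic+1) (by simp)
    · exact ih sv sd (cnt+1) v.1 v.2 (ic+1) h
    · exact ih sv sd cnt cv ct (ic+1) h

-- clean run: the flag loop from an all-true state computes pvChain, counting every entry
theorem pvLemA (δ : Int) (l : List (Int × Int)) (cnt cv ct ic : Int) (hic : 1 ≤ ic) :
    ((l.foldl (pvStepA δ) (true, true, cnt, cv, ct, ic)).1 && (l.foldl (pvStepA δ) (true, true, cnt, cv, ct, ic)).2.1) = pvChain cv ct δ l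
    ∧ (pvChain cv ct δ l = true → (l.foldl (pvStepA δ) (true, true, cnt, cv, ct, ic)).2.2.1 = cnt + l.length) := by
  induction l generalizing cnt cv ct ic with
  | nil => simp [pvChain]
  | cons v t ih =>
    simp only [List.foldl_cons, pvStepA]
    have hic' : ic ≠ 0 := by omega
    by_cases h1 : v.1 = cv
    · subst h1
      by_cases h2 : v.2 - ct = δ
      · rw [if_pos hic', if_neg (by simp), if_neg (by simpa using h2)]
        have hch : pvChain v.1 ct δ (v :: t) = pvChain v.1 v.2 δ t := by
          simp [pvChain, h2]
        obtain ⟨ihl, ihr⟩ := ih (cnt+1) v.1 v.2 (ic+1) (by omega)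
        refine ⟨by rw [hch]; exact ihl, fun hc => ?_⟩
        rw [hch] at hc
        rw [ihr hc]
        simp only [List.length_cons]
        push_cast
        ring
      · rw [if_pos hic', if_neg (by simp), if_pos (by simpa using h2)]
        have hch : pvChain v.1 ct δ (v :: t) = false := by
          simp [pvChain, show (v.2 - ct == δ) = false from by simpa using h2]
        rw [hch]
        exact ⟨pvLemA0 δ t true false cnt v.1 ct (ic+1) (by simp), by simp⟩
    · rw [if_pos hic', if_pos (by simpa using h1)]
      have hch : pvChain cv ct δ (v :: t) = false := by
        simp [pvChain, show (v.1 == cv) = false from by simpa using h1]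
      rw [hch]
      exact ⟨pvLemA0 δ t false true cnt cv ct (ic+1) (by simp), by simp⟩

-- B's record fold from an established record (count ≥ 2) accumulates pvChain in the flag
theorem pvLemB (l : List (Int × Int)) (ref prev st cnt : Int) (valid : Bool) (h2 : 2 ≤ cnt) :
    ∃ p', l.foldl (fun o v => some (pvRecStep o v.1 v.2)) (some (ref, prev, st, cnt, valid))
      = some (ref, p', st, cnt + l.length, valid && pvChain ref prev st l) := by
  induction l generalizing prev cnt valid with
  | nil => exact ⟨prev, by simp [pvChain]⟩
  | cons v t ih =>
    simp only [List.foldl_cons]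
    have hstep : pvRecStep (some (ref, prev, st, cnt, valid)) v.1 v.2
        = (ref, v.2, st, cnt + 1, valid && (v.1 == ref) && (v.2 - prev == st)) := by
      simp [pvRecStep, show (cnt == 1) = false from by simp; omega]
    rw [hstep]
    obtain ⟨p', hp⟩ := ih v.2 (cnt+1) (valid && (v.1 == ref) && (v.2 - prev == st)) (by omega)
    have hcnt : cnt + ((v :: t).length : Int) = (cnt + 1) + (t.length : Int) := by
      simp only [List.length_cons]; push_cast; ring
    have hval : (valid && pvChain ref prev st (v :: t))
        = ((valid && (v.1 == ref) && (v.2 - prev == st)) && pvChain ref v.2 st t) := by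
      simp [pvChain, Bool.and_assoc]
    rw [hcnt, hval]
    exact ⟨p', hp⟩

-- the core pointwise fact: A's per-group check equals B's record check, for nonempty groups
theorem pvCore (g : List (Int × Int)) (hg : g ≠ []) :
    pvCheckA g = pvCheckB (pvRecOf g) := by
  match g with
  | [x] => simp [pvCheckA, pvCheckB, pvRecOf, pvRecStep]
  | [x, y] => simp [pvCheckA, pvCheckB, pvRecOf, pvRecStep]
  | x :: y :: z :: rest =>
    have hacc : pvRecOf (x :: y :: z :: rest)
        = (z :: rest).foldl (fun o v => some (pvRecStep o v.1 v.2))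
            (some (x.1, y.2, y.2 - x.2, 2, true && (y.1 == x.1))) := by
      simp [pvRecOf, pvRecStep]
    -- B side
    have hB : pvCheckB (pvRecOf (x :: y :: z :: rest))
        = ((y.1 == x.1) && pvChain x.1 y.2 (y.2 - x.2) (z :: rest)) := by
      rw [hacc]
      obtain ⟨p', hp⟩ := pvLemB (z :: rest) x.1 y.2 (y.2 - x.2) 2 (true && (y.1 == x.1)) (by omega)
      rw [hp]
      simp only [pvCheckB]
      rw [show (decide (3 ≤ (2 : Int) + ((z :: rest).length : Int))) = true from by
        simp only [List.length_cons]; push_cast; simp; omega]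
      simp
    -- A side
    have hA : pvCheckA (x :: y :: z :: rest)
        = ((y.1 == x.1) && pvChain x.1 y.2 (y.2 - x.2) (z :: rest)) := by
      simp only [pvCheckA]
      rw [if_neg (by simp)]
      have hg0 : PySem.List.pyGetD (x :: y :: z :: rest) 0 ((0 : Int), (0 : Int)) = x := by
        simp [pysem]
      have hg1 : PySem.List.pyGetD (x :: y :: z :: rest) 1 ((0 : Int), (0 : Int)) = y := by
        simp [pysem]
      rw [hg0, hg1]
      have hfold : ∀ L : List (Int × Int), List.foldl (pvStepA (y.2 - x.2)) (true, true, 0, x.1, x.2, 0) (x :: L)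
          = List.foldl (pvStepA (y.2 - x.2)) (true, true, 0, x.1, x.2, 1) L := by
        intro L; simp [pvStepA]
      simp only [hfold]
      have hch : pvChain x.1 x.2 (y.2 - x.2) (y :: z :: rest)
          = ((y.1 == x.1) && pvChain x.1 y.2 (y.2 - x.2) (z :: rest)) := by
        simp [pvChain]
      obtain ⟨hl, hr⟩ := pvLemA (y.2 - x.2) (y :: z :: rest) 0 x.1 x.2 1 (by omega)
      by_cases hc : pvChain x.1 x.2 (y.2 - x.2) (y :: z :: rest) = true
      · rw [← hch, hc]
        simp only [Bool.and_assoc, hl, hc, Bool.and_true]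
        rw [hr hc]
        simp only [decide_eq_true_eq, List.length_cons]
        push_cast
        omega
      · have hc' : pvChain x.1 x.2 (y.2 - x.2) (y :: z :: rest) = false := by
          revert hc; cases pvChain x.1 x.2 (y.2 - x.2) (y :: z :: rest) <;> simp
        rw [← hch, hc']
        have hl' := hl
        rw [hc'] at hl'
        rcases Bool.and_eq_false_iff.mp hl' with h | h <;> simp only [h, Bool.and_false, Bool.false_and]
    rw [hA, hB]

-- d0 (all keys preset to []) looks up to [] everywhere
theorem pvGetD_d0 (l : List (String × Int × Int)) (d : PySem.Dict String (List (Int × Int))) (k : String)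
    (h : d.getD k [] = []) :
    (l.foldl (fun d p => d.insert p.1 ([] : List (Int × Int))) d).getD k [] = [] := by
  induction l generalizing d with
  | nil => exact h
  | cons p t ih =>
    simp only [List.foldl_cons]
    exact ih _ (by rw [PySem.Dict.getD_insert]; split_ifs <;> simp [h])

-- B's single-pass dict, looked up at k, is the record fold over k's group
theorem pvGetB (l : List (String × Int × Int)) (d : PySem.Dict String (Int × Int × Int × Int × Bool)) (k : String) :
    (l.foldl (fun d p => d.insert p.1 (pvRecStep (d.get? p.1) p.2.1 p.2.2)) d).get? k
      = ((l.filter (fun p => p.1 == k)).map (·.2)).foldl (fun o v => some (pvRecStep o v.1 v.2)) (d.get? k) := by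
  induction l generalizing d with
  | nil => simp
  | cons p t ih =>
    simp only [List.foldl_cons]
    by_cases h : p.1 = k
    · subst h
      rw [List.filter_cons_of_pos (by simp)]
      simp only [List.map_cons, List.foldl_cons]
      rw [ih, PySem.Dict.get?_insert_self]
    · rw [List.filter_cons_of_neg (by simpa using h)]
      rw [ih]
      congr 1
      exact PySem.Dict.get?_insert_of_ne _ _ (fun hk => h hk.symm)

-- filtering a (key, F key) tabulation and projecting keys is filtering the keys
theorem pvMapFilter {α : Type} (K : List String) (F : String → α) (P : String × α → Bool) :
    ((K.map (fun k => (k, F k))).filter P).map Prod.fst = K.filter (fun k => P (k, F k)) := by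
  induction K with
  | nil => simp
  | cons k t ih => by_cases h : P (k, F k) <;> simp [h, ih]

-- Set.update is idempotent on an already-deduplicated list
theorem pvUpdIdem {α : Type} [BEq α] [LawfulBEq α] (m : List α) :
    PySem.Set.update (PySem.Set.ofList m) m = PySem.Set.ofList m := by
  rw [PySem.Set.update_eq_append_filter]
  have h : List.filter (fun y => !(PySem.Set.ofList m).contains y) (PySem.Set.ofList m) = [] := by
    apply List.filter_eq_nil_iff.mpr
    intro a ha
    simp [ha]
  rw [h, List.append_nil]

theorem pvFoldSome (t : List (Int × Int)) (r0 : Int × Int × Int × Int × Bool) :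
    ∃ r, t.foldl (fun o v => some (pvRecStep o v.1 v.2)) (some r0) = some r := by
  induction t generalizing r0 with
  | nil => exact ⟨r0, rfl⟩
  | cons v u ih => simpa only [List.foldl_cons] using ih (pvRecStep (some r0) v.1 v.2)

theorem pvRecOf_some (g : List (Int × Int)) (hg : g ≠ []) : ∃ r, pvRecOf g = some r := by
  match g with
  | v :: t =>
    simp only [pvRecOf, List.foldl_cons]
    exact pvFoldSome t (pvRecStep none v.1 v.2)

theorem pvMain (L : List (String × Int × Int)) :
    recurring_list2 L = recurring_list2_alt L := by
  simp only [recurring_list2, recurring_list2_alt]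
  set d0 : PySem.Dict String (List (Int × Int)) :=
    L.foldl (fun d l => d.insert l.1 []) PySem.Dict.empty with hd0
  set dA : PySem.Dict String (List (Int × Int)) :=
    L.foldl (fun d l => d.modify l.1 [] (fun g => g ++ [(l.2.1, l.2.2)])) d0 with hdA
  set dB : PySem.Dict String (Int × Int × Int × Int × Bool) :=
    L.foldl (fun d l => d.insert l.1 (pvRecStep (d.get? l.1) l.2.1 l.2.2)) PySem.Dict.empty with hdB
  have hK0 : d0.keys = PySem.Set.ofList (L.map (fun l => l.1)) := by
    rw [hd0, PySem.Dict.keys_foldl_insert_key L (fun l => l.1) (fun d l => ([] : List (Int × Int))) PySem.Dict.empty]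
    simp [PySem.Set.update_nil_left]
  have hnd0 : d0.keys.Nodup := by
    rw [hd0]
    exact PySem.Dict.nodup_keys_foldl_insert_key L (fun l => l.1) _ _ (by simp)
  have hKA : dA.keys = PySem.Set.ofList (L.map (fun l => l.1)) := by
    rw [hdA, PySem.Dict.keys_foldl_modify_key L (fun l => l.1) [] (fun d l g => g ++ [(l.2.1, l.2.2)]) d0]
    rw [hK0, pvUpdIdem]
  have hndA : dA.keys.Nodup := by
    rw [hdA]
    exact PySem.Dict.nodup_keys_foldl_modify_key L (fun l => l.1) [] _ d0 hnd0
  have hKB : dB.keys = PySem.Set.ofList (L.map (fun l => l.1)) := by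
    rw [hdB, PySem.Dict.keys_foldl_insert_key L (fun l => l.1)
      (fun d l => pvRecStep (d.get? l.1) l.2.1 l.2.2) PySem.Dict.empty]
    simp [PySem.Set.update_nil_left]
  have hndB : dB.keys.Nodup := by
    rw [hdB]
    exact PySem.Dict.nodup_keys_foldl_insert_key L (fun l => l.1) _ _ (by simp)
  have hgA : ∀ k, dA.getD k [] = (L.filter (fun p => p.1 == k)).map (fun p => p.2) := by
    intro k
    rw [hdA]
    rw [show (fun (d : PySem.Dict String (List (Int × Int))) (l : String × Int × Int) =>
          d.modify l.1 [] (fun g => g ++ [(l.2.1, l.2.2)]))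
        = (fun d p => d.modify p.1 [] (fun g => g ++ [p.2])) from rfl]
    rw [PySem.Dict.getD_foldl_modify_append L d0 k]
    rw [show d0.getD k [] = [] from by rw [hd0]; exact pvGetD_d0 L _ k (by simp)]
    simp
  have hgB : ∀ k, dB.get? k = pvRecOf ((L.filter (fun p => p.1 == k)).map (fun p => p.2)) := by
    intro k
    rw [hdB, pvGetB]
    simp [pvRecOf]
  rw [PySem.List.foldl_append_if (fun (kv : String × List (Int × Int)) => pvCheckA kv.2) (fun kv => kv.1) dA.items ([] : List String)]
  rw [PySem.Dict.items_eq_map_keys dA hndA [], hKA]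
  rw [PySem.Dict.items_eq_map_keys dB hndB ((0, 0, 0, 0, false) : Int × Int × Int × Int × Bool), hKB]
  rw [pvMapFilter, pvMapFilter]
  simp only [List.nil_append]
  apply List.filter_congr
  intro k hk
  have hkm : k ∈ L.map (fun l => l.1) := by
    simpa [PySem.Set.mem_ofList] using hk
  have hne : (L.filter (fun p => p.1 == k)).map (fun p => p.2) ≠ [] := by
    obtain ⟨p, hp, hpk⟩ := List.mem_map.mp hkm
    have hmem : p ∈ L.filter (fun p => p.1 == k) := List.mem_filter.mpr ⟨hp, by simp [hpk]⟩
    intro hnil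
    rw [List.map_eq_nil_iff.mp hnil] at hmem
    simp at hmem
  obtain ⟨r, hr⟩ := pvRecOf_some _ hne
  have hDB : dB.getD k ((0, 0, 0, 0, false) : Int × Int × Int × Int × Bool) = r := by
    rw [PySem.Dict.getD_eq_get?_getD, hgB k, hr]
    rfl
  rw [hgA k, pvCore _ hne, hr, hDB]
  simp [pvCheckB]

-- ===== VERDICT (by name: the statement is the Claim_ definition above) =====
theorem recurring_list2_spec : Claim_equal_recurring_list2 := by
  intro _list _
  unfold Spec_recurring_list2
  exact pvMain _list
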